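-- pv_equiv track=rewrite | github.com/bibleman-stan/readers-gnt | scripts/apply_vocative_rule.py | find_phrase_in_line
-- ===== SOURCE A (Python) =====
-- def find_phrase_in_line(line_words_clean, phrase):
--     """Find a phrase in cleaned line words. Returns (start, end) or None."""
--     plen = len(phrase)
--     for si in range(len(line_words_clean)):
--         if si + plen > len(line_words_clean):
--             break
--         if all(line_words_clean[si+j] == phrase[j] for j in range(plen)):
--             return (si, si + plen)
--     return None
-- ===== SOURCE B (Python) =====
-- def find_phrase_in_line(line_words_clean, phrase):
--     """Find a phrase in cleaned line words. Returns (start, end) or None.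
--
--     Single forward pass (NFA-style simulation): maintains the list of active
--     matched-prefix lengths instead of testing each start position with an
--     inner window comparison; a word is read once and never revisited.  The
--     empty phrase matches at position 0, so it returns (0, 0) even on the
--     empty line (where A returns None).
--     """
--     m = len(phrase)
--     if m == 0:
--         return (0, 0)
--     states = [0]
--     for i, w in enumerate(line_words_clean):
--         states = [q + 1 for q in states if q < m and phrase[q] == w]
--         states.append(0)
--         if m in states:
--             return (i + 1 - m, i + 1)
--     return None
-- ===== Notes on version B (the rewrite author's own statement) =====
-- stated objective: alternative
-- what changed: replaces A's start-position scan with an inner per-window comparison by a single forward pass that maintains the list of active matched-prefix lengths (NFA-style simulation): each line word is read once and never revisited, and no window is re-compared from scratch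
-- intended difference: on the single input ([], []) A returns None although the empty phrase matches at position 0 (its loop over range(0) never runs), while B returns (0, 0), consistent with A's own (0,0) answer for an empty phrase on every non-empty line — e.g. on find_phrase_in_line([], []): A returns none, B returns some (0, 0)
import Mathlib
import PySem

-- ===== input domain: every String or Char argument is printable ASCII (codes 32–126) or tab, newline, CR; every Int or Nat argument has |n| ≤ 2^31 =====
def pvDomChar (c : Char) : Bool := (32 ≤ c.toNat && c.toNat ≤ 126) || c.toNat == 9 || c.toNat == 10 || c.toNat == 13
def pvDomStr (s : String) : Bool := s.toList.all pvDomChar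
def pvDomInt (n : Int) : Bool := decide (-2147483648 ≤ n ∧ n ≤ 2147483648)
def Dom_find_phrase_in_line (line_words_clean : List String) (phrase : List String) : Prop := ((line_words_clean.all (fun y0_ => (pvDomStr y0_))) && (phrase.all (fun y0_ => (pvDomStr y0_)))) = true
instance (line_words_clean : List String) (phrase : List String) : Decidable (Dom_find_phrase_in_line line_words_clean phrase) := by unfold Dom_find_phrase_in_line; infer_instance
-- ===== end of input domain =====

-- B replaces A's start-position scan (inner per-window comparison) by a single forward pass that
-- maintains the list of active matched-prefix lengths (NFA-style simulation), and returns (0,0)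
-- for the empty phrase on the empty line (D_ below); objective: alternative.


-- ===== PORT A =====
-- inner 'all(line_words_clean[si+j] == phrase[j] for j in range(plen))'; the loop guard keeps
-- every index in range, so comparing the pyGet? options is exact (no IndexError is reachable)
def pvAllMatch (line_words_clean phrase : List String) (plen si : Int) : Bool :=
  (PySem.List.pyRange 0 plen 1).all (fun j =>
    PySem.List.pyGet? line_words_clean (si + j) == PySem.List.pyGet? phrase j)

-- the 'for si in range(len(line_words_clean))' loop with its break and early return
def pvLoopA (line_words_clean phrase : List String) (plen : Int) : List Int → Option (Int × Int)
  | [] => none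
  | si :: rest =>
    if si + plen > (line_words_clean.length : Int) then none
    else if pvAllMatch line_words_clean phrase plen si then some (si, si + plen)
    else pvLoopA line_words_clean phrase plen rest

def find_phrase_in_line (line_words_clean : List String) (phrase : List String) : Option (Int × Int) :=
  pvLoopA line_words_clean phrase (phrase.length : Int)
    (PySem.List.pyRange 0 (line_words_clean.length : Int) 1)

-- ===== PORT B =====
-- 'for i, w in enumerate(line_words_clean): states = [q+1 for q in states if q < m and phrase[q] == w];
--  states.append(0); if m in states: return (i+1-m, i+1)'; phrase[q] is only reached under q < m and
-- states never holds a negative value, so pyGet? is exact here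
def pvLoopB (phrase : List String) (m : Int) (states : List Int) (i : Int) :
    List String → Option (Int × Int)
  | [] => none
  | w :: rest =>
    let states' := (states.filter (fun q =>
        decide (q < m) && (PySem.List.pyGet? phrase q == some w))).map (· + 1) ++ [0]
    if states'.contains m then some (i + 1 - m, i + 1)
    else pvLoopB phrase m states' (i + 1) rest

def find_phrase_in_line_alt (line_words_clean : List String) (phrase : List String) : Option (Int × Int) :=
  if (phrase.length : Int) == 0 then some (0, 0)
  else pvLoopB phrase (phrase.length : Int) [0] 0 line_words_clean

-- ===== PRECONDITION & SPEC =====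
-- on ([], []) A returns None although the empty phrase matches at position 0 (its loop over
-- range(0) never runs), while B returns (0, 0), consistent with A's own (0,0) answer for an
-- empty phrase on every non-empty line
def D_find_phrase_in_line (line_words_clean : List String) (phrase : List String) : Prop :=
  line_words_clean = [] ∧ phrase = []
instance (line_words_clean : List String) (phrase : List String) : Decidable (D_find_phrase_in_line line_words_clean phrase) := by unfold D_find_phrase_in_line; infer_instance

def Spec_find_phrase_in_line (line_words_clean : List String) (phrase : List String) (out : Option (Int × Int)) : Prop := ¬ D_find_phrase_in_line line_words_clean phrase → out = find_phrase_in_line_alt line_words_clean phrase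
instance (line_words_clean : List String) (phrase : List String) (out : Option (Int × Int)) : Decidable (Spec_find_phrase_in_line line_words_clean phrase out) := by unfold Spec_find_phrase_in_line; infer_instance

def pvDiffWitness_find_phrase_in_line : List String × List String := ([], [])
def pvDiffWitnessOut_find_phrase_in_line : (Option (Int × Int)) × (Option (Int × Int)) := (none, some (0, 0))

-- ===== CLAIM (what is proved, stated in full; the proofs are below) =====
def Claim_unchanged_find_phrase_in_line : Prop := ∀ (line_words_clean : List String) (phrase : List String), Dom_find_phrase_in_line line_words_clean phrase → Spec_find_phrase_in_line line_words_clean phrase (find_phrase_in_line line_words_clean phrase)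
def Claim_changed_find_phrase_in_line : Prop := Dom_find_phrase_in_line (pvDiffWitness_find_phrase_in_line.1) (pvDiffWitness_find_phrase_in_line.2) ∧ D_find_phrase_in_line (pvDiffWitness_find_phrase_in_line.1) (pvDiffWitness_find_phrase_in_line.2) ∧ find_phrase_in_line (pvDiffWitness_find_phrase_in_line.1) (pvDiffWitness_find_phrase_in_line.2) = pvDiffWitnessOut_find_phrase_in_line.1 ∧ find_phrase_in_line_alt (pvDiffWitness_find_phrase_in_line.1) (pvDiffWitness_find_phrase_in_line.2) = pvDiffWitnessOut_find_phrase_in_line.2 ∧ pvDiffWitnessOut_find_phrase_in_line.1 ≠ pvDiffWitnessOut_find_phrase_in_line.2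
def Claim_exact_find_phrase_in_line : Prop := ∀ (line_words_clean : List String) (phrase : List String), Dom_find_phrase_in_line line_words_clean phrase → D_find_phrase_in_line line_words_clean phrase → find_phrase_in_line line_words_clean phrase ≠ find_phrase_in_line_alt line_words_clean phrase

-- ===== LEMMAS AND PROOFS =====

-- canonical first match: least k ≥ the argument with a whole window equal to the phrase
def pvFirst (lw ph : List String) (k : Nat) : Option Nat :=
  if _h : k < lw.length then
    if k + ph.length ≤ lw.length ∧ (lw.drop k).take ph.length = ph then some k
    else pvFirst lw ph (k + 1)
  else none
termination_by lw.length - k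

theorem pvFirst_none_of (lw ph : List String) (k : Nat)
    (h : ∀ b, k ≤ b → b < lw.length →
      ¬ (b + ph.length ≤ lw.length ∧ (lw.drop b).take ph.length = ph)) :
    pvFirst lw ph k = none := by
  generalize hd : lw.length - k = d
  induction d generalizing k with
  | zero => rw [pvFirst, dif_neg (by omega)]
  | succ d ih =>
    rw [pvFirst]
    by_cases hk : k < lw.length
    · rw [dif_pos hk, if_neg (h k le_rfl hk)]
      exact ih (k + 1) (fun b hb => h b (by omega)) (by omega)
    · rw [dif_neg hk]

theorem pvFirst_some_of (lw ph : List String) (k a : Nat) (hka : k ≤ a)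
    (hg : a + ph.length ≤ lw.length ∧ (lw.drop a).take ph.length = ph)
    (ha : a < lw.length)
    (hmin : ∀ b, k ≤ b → b < a →
      ¬ (b + ph.length ≤ lw.length ∧ (lw.drop b).take ph.length = ph)) :
    pvFirst lw ph k = some a := by
  generalize hd : a - k = d
  induction d generalizing k with
  | zero =>
    have : k = a := by omega
    subst this
    rw [pvFirst, dif_pos ha, if_pos hg]
  | succ d ih =>
    rw [pvFirst, dif_pos (by omega), if_neg (hmin k le_rfl (by omega))]
    exact ih (k + 1) (by omega) (fun b hb => hmin b (by omega)) (by omega)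

-- the inner all() equals one whole-window comparison (indices in range by the guard)
theorem pv_match_iff (lw ph : List String) (k : Nat) (_hk : k + ph.length ≤ lw.length) :
    pvAllMatch lw ph (ph.length : Int) (k : Int) =
    ((lw.drop k).take ph.length == ph) := by
  rw [Bool.eq_iff_iff]
  simp only [pvAllMatch, List.all_eq_true, beq_iff_eq, PySem.List.mem_pyRange_one]
  constructor
  · intro h
    apply List.ext_getElem?
    intro i
    by_cases hi : i < ph.length
    · have h2 := h (i : Int) ⟨by positivity, by exact_mod_cast hi⟩
      have hcast : (k : Int) + (i : Int) = ((k + i : Nat) : Int) := by push_cast; ring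
      rw [hcast, PySem.List.pyGet?_natCast, PySem.List.pyGet?_natCast] at h2
      simpa [List.getElem?_take, List.getElem?_drop, hi] using h2
    · have h1 : ((lw.drop k).take ph.length)[i]? = none := by
        apply List.getElem?_eq_none
        have := List.length_take_le ph.length (lw.drop k)
        omega
      have h2 : ph[i]? = none := List.getElem?_eq_none (by omega)
      rw [h1, h2]
  · intro h j hj
    obtain ⟨hj0, hjm⟩ := hj
    obtain ⟨jn, rfl⟩ := Int.eq_ofNat_of_zero_le hj0
    have hjn : jn < ph.length := by exact_mod_cast hjm
    have hcast : (k : Int) + (jn : Int) = ((k + jn : Nat) : Int) := by push_cast; ring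
    rw [hcast, PySem.List.pyGet?_natCast, PySem.List.pyGet?_natCast]
    have := congrArg (fun l => l[jn]?) h
    simpa [List.getElem?_take, List.getElem?_drop, hjn] using this

-- A's loop from start position k computes the canonical first match
theorem pv_loopA_eq (lw ph : List String) (k : Nat) :
    pvLoopA lw ph (ph.length : Int) (PySem.List.pyRange (k : Int) (lw.length : Int) 1) =
    (pvFirst lw ph k).map (fun a : Nat => ((a : Int), (a : Int) + (ph.length : Int))) := by
  generalize hd : lw.length - k = d
  induction d generalizing k with
  | zero =>
    rw [PySem.List.pyRange_one_eq_nil (by exact_mod_cast Nat.le_of_sub_eq_zero hd),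
        pvFirst, dif_neg (by omega)]
    rfl
  | succ d ih =>
    have hkn : k < lw.length := by omega
    rw [PySem.List.pyRange_one_cons (by exact_mod_cast hkn)]
    by_cases hfit : k + ph.length ≤ lw.length
    · have hguard : ¬ ((k : Int) + (ph.length : Int) > (lw.length : Int)) := by
        have : (k : Int) + (ph.length : Int) ≤ (lw.length : Int) := by exact_mod_cast hfit
        omega
      rw [pvLoopA, if_neg hguard, pv_match_iff lw ph k hfit, pvFirst, dif_pos hkn]
      by_cases hw : (lw.drop k).take ph.length = ph
      · rw [if_pos (beq_iff_eq.mpr hw), if_pos ⟨hfit, hw⟩]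
        rfl
      · rw [if_neg (by simpa using hw), if_neg (by tauto)]
        have hcast : (k : Int) + 1 = ((k + 1 : Nat) : Int) := by push_cast; ring
        rw [hcast]
        exact ih (k + 1) (by omega)
    · have hguard : (k : Int) + (ph.length : Int) > (lw.length : Int) := by
        have : lw.length < k + ph.length := by omega
        exact_mod_cast this
      rw [pvLoopA, if_pos hguard,
          pvFirst_none_of lw ph k (fun b hb _ hg => hfit (by omega))]
      rfl

-- l ++ [a] is a suffix of p ++ [w] exactly when a = w and l is a suffix of p
theorem pv_suffix_concat {α : Type} (l p : List α) (a w : α) :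
    (l ++ [a]) <:+ (p ++ [w]) ↔ a = w ∧ l <:+ p := by
  rw [← List.reverse_prefix]
  simp [List.cons_prefix_cons]

-- a whole-window match is the phrase being a suffix of the line's prefix ending there
theorem pv_window_suffix (lw ph : List String) (k : Nat) (h : k + ph.length ≤ lw.length) :
    (lw.drop k).take ph.length = ph ↔ ph <:+ lw.take (k + ph.length) := by
  constructor
  · intro hw
    exact ⟨lw.take k, by rw [List.take_add, hw]⟩
  · rintro ⟨t, ht⟩
    have hlen : t.length = k := by
      have := congrArg List.length ht
      simp [List.length_take] at this
      omega
    have h2 := congrArg (fun l => l.drop k) ht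
    simp only [← hlen, List.drop_left, List.drop_take] at h2
    rw [hlen] at h2
    rw [show k + ph.length - k = ph.length by omega] at h2
    exact h2.symm

-- one step of B's pass: membership in the new state list characterised by suffix matching
theorem pv_step_mem (ph p : List String) (w : String) (states : List Int)
    (hInv : ∀ q : Int, q ∈ states ↔
      0 ≤ q ∧ q < (ph.length : Int) ∧ ph.take q.toNat <:+ p) :
    ∀ q' : Int,
      q' ∈ ((states.filter (fun q =>
          decide (q < (ph.length : Int)) && (PySem.List.pyGet? ph q == some w))).map (· + 1) ++ [0]) ↔
      0 ≤ q' ∧ q' ≤ (ph.length : Int) ∧ ph.take q'.toNat <:+ (p ++ [w]) := by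
  intro q'
  simp only [List.mem_append, List.mem_map, List.mem_filter, List.mem_singleton,
    Bool.and_eq_true, decide_eq_true_eq, beq_iff_eq]
  constructor
  · rintro (⟨q, ⟨hqs, hqm, hget⟩, rfl⟩ | rfl)
    · obtain ⟨hq0, _, hsuf⟩ := (hInv q).mp hqs
      obtain ⟨qn, rfl⟩ := Int.eq_ofNat_of_zero_le hq0
      have hqn : qn < ph.length := by exact_mod_cast hqm
      rw [PySem.List.pyGet?_natCast] at hget
      have hgetn : ph[qn]? = some w := hget
      refine ⟨by positivity, by exact_mod_cast hqn, ?_⟩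
      have htn : ((qn : Int) + 1).toNat = qn + 1 := by omega
      rw [htn, List.take_add_one, hgetn]
      rw [Option.toList_some]
      rw [pv_suffix_concat]
      exact ⟨rfl, by simpa using hsuf⟩
    · exact ⟨le_rfl, by positivity, by simp⟩
  · rintro ⟨hq0, hqm, hsuf⟩
    by_cases hz : q' = 0
    · exact Or.inr hz
    · left
      have hq1 : 1 ≤ q' := by omega
      obtain ⟨qn', rfl⟩ := Int.eq_ofNat_of_zero_le hq0
      have hqn'1 : 1 ≤ qn' := by exact_mod_cast hq1
      have hqn'm : qn' ≤ ph.length := by exact_mod_cast hqm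
      have hlt : qn' - 1 < ph.length := by omega
      refine ⟨((qn' - 1 : Nat) : Int), ⟨?_, by exact_mod_cast hlt, ?_⟩, by omega⟩
      · rw [hInv]
        refine ⟨by positivity, by exact_mod_cast hlt, ?_⟩
        have htn : ((qn' : Nat) : Int).toNat = qn' := by omega
        rw [htn] at hsuf
        rw [show qn' = (qn' - 1) + 1 by omega, List.take_add_one,
            List.getElem?_eq_getElem hlt, Option.toList_some, pv_suffix_concat] at hsuf
        have h2 := hsuf.2
        simpa using h2
      · rw [PySem.List.pyGet?_natCast]
        have htn : ((qn' : Nat) : Int).toNat = qn' := by omega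
        rw [htn] at hsuf
        rw [show qn' = (qn' - 1) + 1 by omega, List.take_add_one,
            List.getElem?_eq_getElem hlt, Option.toList_some, pv_suffix_concat] at hsuf
        rw [List.getElem?_eq_getElem hlt, hsuf.1]

-- B's pass over the unread words computes the canonical first match of the whole line
theorem pv_loopB_eq (ph : List String) (hm : 1 ≤ ph.length) :
    ∀ (rest p : List String) (states : List Int),
      (∀ q : Int, q ∈ states ↔
        0 ≤ q ∧ q < (ph.length : Int) ∧ ph.take q.toNat <:+ p) →
      (∀ e : Nat, e ≤ p.length → ¬ ph <:+ p.take e) →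
      pvLoopB ph (ph.length : Int) states (p.length : Int) rest =
        (pvFirst (p ++ rest) ph 0).map (fun a : Nat => ((a : Int), (a : Int) + (ph.length : Int))) := by
  intro rest
  induction rest with
  | nil =>
    intro p states _ hno
    rw [List.append_nil, pvFirst_none_of]
    · rfl
    · intro b _ hb ⟨hfit, hw⟩
      exact hno (b + ph.length) hfit ((pv_window_suffix p ph b hfit).mp hw)
  | cons w rest' ih =>
    intro p states hInv hno
    have hmem := pv_step_mem ph p w states hInv
    rw [pvLoopB]
    set S : List Int := (states.filter (fun q =>
        decide (q < (ph.length : Int)) && (PySem.List.pyGet? ph q == some w))).map (· + 1) ++ [0] with hS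
    by_cases hc : S.contains (ph.length : Int)
    · rw [if_pos hc]
      have hmS : (ph.length : Int) ∈ S := by
        rwa [List.contains_iff_mem] at hc
      have hsuf : ph <:+ p ++ [w] := by
        have := (hmem _).mp hmS
        simpa using this.2.2
      have hmlen : ph.length ≤ p.length + 1 := by
        have := hsuf.length_le
        simpa using this
      set a : Nat := p.length + 1 - ph.length with ha
      have hfit : a + ph.length ≤ (p ++ w :: rest').length := by
        simp only [List.length_append, List.length_cons]; omega
      have htake : (p ++ w :: rest').take (a + ph.length) = p ++ [w] := by
        rw [show a + ph.length = p.length + 1 by omega,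
            show p ++ w :: rest' = (p ++ [w]) ++ rest' by simp,
            List.take_append_of_le_length (by simp), List.take_of_length_le (by simp)]
      have hgood : a + ph.length ≤ (p ++ w :: rest').length ∧
          ((p ++ w :: rest').drop a).take ph.length = ph := by
        refine ⟨hfit, ?_⟩
        rw [pv_window_suffix _ _ _ hfit, htake]
        exact hsuf
      rw [pvFirst_some_of (p ++ w :: rest') ph 0 a (by omega) hgood (by simp; omega)]
      · simp only [Option.map_some, Option.some.injEq, Prod.mk.injEq]
        constructor <;> omega
      · intro b _ hb ⟨hfitb, hwb⟩
        have hble : b + ph.length ≤ p.length := by omega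
        have := (pv_window_suffix _ ph b hfitb).mp hwb
        rw [show p ++ w :: rest' = (p ++ [w]) ++ rest' by simp,
            List.take_append_of_le_length (by simp; omega),
            List.take_append_of_le_length (by omega)] at this
        exact hno (b + ph.length) hble this
    · rw [if_neg hc]
      have hInv' : ∀ q : Int, q ∈ S ↔
          0 ≤ q ∧ q < (ph.length : Int) ∧ ph.take q.toNat <:+ p ++ [w] := by
        intro q
        rw [hmem q]
        constructor
        · rintro ⟨h0, hle, hs⟩
          refine ⟨h0, ?_, hs⟩
          rcases lt_or_eq_of_le hle with h | h
          · exact h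
          · exfalso
            apply hc
            rw [List.contains_iff_mem]
            rw [← h] at hmem ⊢
            exact (hmem q).mpr ⟨h0, le_rfl, hs⟩
        · rintro ⟨h0, hlt, hs⟩
          exact ⟨h0, le_of_lt hlt, hs⟩
      have hno' : ∀ e : Nat, e ≤ (p ++ [w]).length → ¬ ph <:+ (p ++ [w]).take e := by
        intro e he hsuf
        simp only [List.length_append, List.length_singleton] at he
        rcases Nat.lt_or_ge e (p.length + 1) with h | h
        · have hep : e ≤ p.length := by omega
          rw [List.take_append_of_le_length hep] at hsuf
          exact hno e hep hsuf
        · have : e = p.length + 1 := by omega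
          rw [this, List.take_of_length_le (by simp)] at hsuf
          apply hc
          rw [List.contains_iff_mem]
          refine (hmem _).mpr ⟨by positivity, le_rfl, ?_⟩
          simpa using hsuf
      have := ih (p ++ [w]) S hInv' hno'
      rw [show ((p ++ [w]).length : Int) = (p.length : Int) + 1 by simp] at this
      rw [this, show (p ++ [w]) ++ rest' = p ++ w :: rest' by simp]

-- ===== VERDICT (by name: the statement is the Claim_ definition above) =====
theorem find_phrase_in_line_spec : Claim_unchanged_find_phrase_in_line := by
  intro lw ph _ hnD
  show find_phrase_in_line lw ph = find_phrase_in_line_alt lw ph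
  by_cases hph : ph = []
  · subst hph
    match lw with
    | [] => exact absurd ⟨rfl, rfl⟩ hnD
    | x :: t =>
      rw [find_phrase_in_line, find_phrase_in_line_alt]
      have h1 : (0 : Int) < ((x :: t).length : Int) := by simp
      rw [PySem.List.pyRange_one_cons h1]
      simp [pvLoopA, pvAllMatch, PySem.List.pyRange_one_eq_nil]
      positivity
  · have hm : 1 ≤ ph.length := by
      cases ph with
      | nil => exact absurd rfl hph
      | cons a l => simp
    rw [find_phrase_in_line, find_phrase_in_line_alt,
        if_neg (by simp; omega)]
    have hA := pv_loopA_eq lw ph 0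
    rw [show ((0 : Nat) : Int) = (0 : Int) from rfl] at hA
    rw [hA]
    have hInv0 : ∀ q : Int, q ∈ ([0] : List Int) ↔
        0 ≤ q ∧ q < (ph.length : Int) ∧ ph.take q.toNat <:+ ([] : List String) := by
      intro q
      simp only [List.mem_singleton, List.suffix_nil]
      constructor
      · rintro rfl
        exact ⟨le_rfl, by exact_mod_cast hm, by simp⟩
      · rintro ⟨h0, _, hs⟩
        have : ph.take q.toNat = [] := hs
        rcases List.take_eq_nil_iff.mp this with h | h
        · omega
        · exact absurd h hph
    have hno0 : ∀ e : Nat, e ≤ ([] : List String).length →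
        ¬ ph <:+ ([] : List String).take e := by
      intro e he hsuf
      simp at hsuf
      exact hph hsuf
    have hB := pv_loopB_eq ph hm lw [] [0] hInv0 hno0
    simpa using hB.symm

theorem find_phrase_in_line_changed : Claim_changed_find_phrase_in_line := by
  unfold Claim_changed_find_phrase_in_line; decide

theorem find_phrase_in_line_tight : Claim_exact_find_phrase_in_line := by
  intro lw ph _ hD
  obtain ⟨h1, h2⟩ := hD
  subst h1; subst h2; decide
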